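-- pv_equiv track=rewrite | github.com/ViveK9740/Trip-AI | backend-python/agents/nlp_agent.py | _extract_activities
-- ===== SOURCE A (Python) =====
-- from typing import Dict, Any, List, Optional
--
-- def _extract_activities(query: str) -> List[str]:
--     """Extract activity preferences"""
--     activities = []
--     query_lower = query.lower()
--
--     if 'beach' in query_lower:
--         activities.append('beaches')
--     if 'trek' in query_lower:
--         activities.append('trekking')
--     if 'adventure' in query_lower:
--         activities.append('adventure')
--     if any(word in query_lower for word in ['cultural', 'heritage', 'temple']):
--         activities.append('cultural')
--     if any(word in query_lower for word in ['nightlife', 'party', 'club']):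
--         activities.append('nightlife')
--     if any(word in query_lower for word in ['nature', 'wildlife']):
--         activities.append('nature')
--
--     return activities
-- ===== SOURCE B (Python) =====
-- # Single left-to-right scan of the query: at each position match all keywords at once
-- # (multi-pattern matching), collect labels into a set, then emit labels in fixed order.
-- _KEYWORD_LABELS = [
--     ('beach', 'beaches'), ('trek', 'trekking'), ('adventure', 'adventure'),
--     ('cultural', 'cultural'), ('heritage', 'cultural'), ('temple', 'cultural'),
--     ('nightlife', 'nightlife'), ('party', 'nightlife'), ('club', 'nightlife'),
--     ('nature', 'nature'), ('wildlife', 'nature'),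
-- ]
-- _LABEL_ORDER = ['beaches', 'trekking', 'adventure', 'cultural', 'nightlife', 'nature']
--
-- def _extract_activities(query: str):
--     q = query.lower()
--     found = set()
--     for i in range(len(q)):
--         for kw, label in _KEYWORD_LABELS:
--             if q.startswith(kw, i):
--                 found.add(label)
--     return [label for label in _LABEL_ORDER if label in found]
-- ===== Notes on version B (the rewrite author's own statement) =====
-- stated objective: alternative
-- what changed: Instead of six per-label substring searches over the whole query, B makes a single left-to-right scan of the lowered query, matching all eleven keywords at each position (multi-pattern matching into a set of labels), then emits labels in a fixed canonical order.
import Mathlib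
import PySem

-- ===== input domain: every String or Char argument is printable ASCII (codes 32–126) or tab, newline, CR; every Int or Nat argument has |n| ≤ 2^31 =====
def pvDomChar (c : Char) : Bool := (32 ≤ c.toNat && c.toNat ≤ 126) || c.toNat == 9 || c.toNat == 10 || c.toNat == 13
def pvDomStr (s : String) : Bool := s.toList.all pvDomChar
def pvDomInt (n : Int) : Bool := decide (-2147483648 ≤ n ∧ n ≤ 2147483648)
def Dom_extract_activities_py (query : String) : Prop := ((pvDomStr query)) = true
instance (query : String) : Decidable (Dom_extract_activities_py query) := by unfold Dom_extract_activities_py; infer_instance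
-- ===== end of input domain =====

-- B replaces A's six per-label substring searches by a single left-to-right scan of the
-- lowered query matching all keywords at each position into a set of labels (objective: alternative).
-- ===== PORT A =====
def extract_activities_py (query : String) : List String :=
  let activities : List String := []
  let query_lower := PySem.Str.lower query
  let activities := if PySem.Str.isIn "beach" query_lower then activities ++ ["beaches"] else activities
  let activities := if PySem.Str.isIn "trek" query_lower then activities ++ ["trekking"] else activities
  let activities := if PySem.Str.isIn "adventure" query_lower then activities ++ ["adventure"] else activities
  let activities := if (["cultural", "heritage", "temple"].any (fun w => PySem.Str.isIn w query_lower)) then activities ++ ["cultural"] else activities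
  let activities := if (["nightlife", "party", "club"].any (fun w => PySem.Str.isIn w query_lower)) then activities ++ ["nightlife"] else activities
  let activities := if (["nature", "wildlife"].any (fun w => PySem.Str.isIn w query_lower)) then activities ++ ["nature"] else activities
  activities

-- ===== PORT B =====
-- B: one scan over the positions of the lowered query; at each position every (keyword, label)
-- pair is tried and matching labels are added to a set; labels are emitted in fixed order.
def kwLabels : List (String × String) :=
  [("beach", "beaches"), ("trek", "trekking"), ("adventure", "adventure"),
   ("cultural", "cultural"), ("heritage", "cultural"), ("temple", "cultural"),
   ("nightlife", "nightlife"), ("party", "nightlife"), ("club", "nightlife"),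
   ("nature", "nature"), ("wildlife", "nature")]

def labelOrder : List String :=
  ["beaches", "trekking", "adventure", "cultural", "nightlife", "nature"]

def extract_activities_py_alt (query : String) : List String :=
  let q := PySem.Str.lower query
  -- q.startswith(kw, i) with 0 ≤ i < len(q) is exactly: kw is a prefix of the suffix of q at i
  let found : PySem.Set String :=
    (PySem.List.pyRange 0 (PySem.Str.len q) 1).foldl
      (fun s i => kwLabels.foldl
        (fun s p => if PySem.Chars.startswith (q.toList.drop i.toNat) p.1.toList then PySem.Set.add s p.2 else s)
        s)
      PySem.Set.empty
  labelOrder.filter (fun lab => PySem.Set.contains found lab)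

-- ===== PRECONDITION & SPEC =====
def Spec_extract_activities_py (query : String) (out : List String) : Prop := out = extract_activities_py_alt query
instance (query : String) (out : List String) : Decidable (Spec_extract_activities_py query out) := by unfold Spec_extract_activities_py; infer_instance

-- ===== CLAIM (what is proved, stated in full; the proofs are below) =====
def Claim_equal_extract_activities_py : Prop := ∀ (query : String), Dom_extract_activities_py query → Spec_extract_activities_py query (extract_activities_py query)

-- ===== LEMMAS AND PROOFS =====

-- membership after the inner fold over the keyword table
lemma mem_inner_fold (q : String) (i : Int) (l : List (String × String)) (s : PySem.Set String) (x : String) :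
    x ∈ l.foldl (fun s p => if PySem.Chars.startswith (q.toList.drop i.toNat) p.1.toList then PySem.Set.add s p.2 else s) s ↔
      x ∈ s ∨ ∃ p ∈ l, PySem.Chars.startswith (q.toList.drop i.toNat) p.1.toList = true ∧ p.2 = x := by
  induction l generalizing s with
  | nil => simp
  | cons p t ih =>
    simp only [List.foldl_cons, ih, List.mem_cons]
    split_ifs with h
    · constructor
      · rintro (hm | ⟨p', hp', hsw, hx⟩)
        · rcases (PySem.Set.mem_add _ _ _).1 hm with hm | hm
          · exact Or.inl hm
          · exact Or.inr ⟨p, Or.inl rfl, h, hm.symm⟩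
        · exact Or.inr ⟨p', Or.inr hp', hsw, hx⟩
      · rintro (hm | ⟨p', hp' | hp', hsw, hx⟩)
        · exact Or.inl ((PySem.Set.mem_add _ _ _).2 (Or.inl hm))
        · exact Or.inl ((PySem.Set.mem_add _ _ _).2 (Or.inr (hp' ▸ hx.symm)))
        · exact Or.inr ⟨p', hp', hsw, hx⟩
    · constructor
      · rintro (hm | ⟨p', hp', hsw, hx⟩)
        · exact Or.inl hm
        · exact Or.inr ⟨p', Or.inr hp', hsw, hx⟩
      · rintro (hm | ⟨p', hp' | hp', hsw, hx⟩)
        · exact Or.inl hm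
        · exact absurd (hp' ▸ hsw) (by simpa using h)
        · exact Or.inr ⟨p', hp', hsw, hx⟩

-- membership after the outer fold over the positions
lemma mem_outer_fold (q : String) (l : List Int) (s : PySem.Set String) (x : String) :
    x ∈ l.foldl (fun s i => kwLabels.foldl
        (fun s p => if PySem.Chars.startswith (q.toList.drop i.toNat) p.1.toList then PySem.Set.add s p.2 else s) s) s ↔
      x ∈ s ∨ ∃ i ∈ l, ∃ p ∈ kwLabels, PySem.Chars.startswith (q.toList.drop i.toNat) p.1.toList = true ∧ p.2 = x := by
  induction l generalizing s with
  | nil => simp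
  | cons i t ih =>
    simp only [List.foldl_cons, ih, mem_inner_fold, List.mem_cons]
    constructor
    · rintro (⟨hm | ⟨p, hp, hsw, hx⟩⟩ | ⟨i', hi', p, hp, hsw, hx⟩)
      · exact Or.inl hm
      · exact Or.inr ⟨i, Or.inl rfl, p, hp, hsw, hx⟩
      · exact Or.inr ⟨i', Or.inr hi', p, hp, hsw, hx⟩
    · rintro (hm | ⟨i', hi' | hi', p, hp, hsw, hx⟩)
      · exact Or.inl (Or.inl hm)
      · exact Or.inl (Or.inr ⟨p, hp, by rw [← hi']; exact hsw, hx⟩)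
      · exact Or.inr ⟨i', hi', p, hp, hsw, hx⟩

-- a nonempty keyword occurs as a prefix of some suffix at a scanned position iff it is a substring
lemma exists_pos_iff_isIn (q kw : String) (hk : kw.toList ≠ []) :
    (∃ i ∈ PySem.List.pyRange 0 (PySem.Str.len q) 1,
        PySem.Chars.startswith (q.toList.drop i.toNat) kw.toList = true) ↔
      PySem.Str.isIn kw q = true := by
  have hlen : PySem.Str.len q = (q.toList.length : Int) := by
    simp [PySem.Str.len_eq]
  rw [show PySem.Str.isIn kw q = PySem.Chars.isIn kw.toList q.toList from by simp,
    ← PySem.Chars.exists_prefix_drop_iff_isIn]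
  constructor
  · rintro ⟨i, hi, hsw⟩
    exact ⟨i.toNat, (PySem.Chars.startswith_iff _ _).1 hsw⟩
  · rintro ⟨j, hj⟩
    by_cases hjl : j < q.toList.length
    · refine ⟨(j : Int), ?_, (PySem.Chars.startswith_iff _ _).2 (by simpa using hj)⟩
      rw [PySem.List.mem_pyRange_one, hlen]
      constructor <;> [positivity; exact_mod_cast hjl]
    · exfalso
      have : q.toList.drop j = [] := List.drop_eq_nil_of_le (by omega)
      rw [this] at hj
      exact hk (List.prefix_nil.mp hj)

-- Set.contains of the scan's result, as the substring test itself
lemma contains_found (q lab : String) :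
    PySem.Set.contains
      ((PySem.List.pyRange 0 (PySem.Str.len q) 1).foldl
        (fun s i => kwLabels.foldl
          (fun s p => if PySem.Chars.startswith (q.toList.drop i.toNat) p.1.toList then PySem.Set.add s p.2 else s) s)
        PySem.Set.empty) lab =
      kwLabels.any (fun p => (p.2 == lab) && PySem.Str.isIn p.1 q) := by
  rw [Bool.eq_iff_iff, PySem.Set.contains_iff, mem_outer_fold]
  simp only [PySem.Set.empty, List.not_mem_nil, false_or, List.any_eq_true,
    Bool.and_eq_true, beq_iff_eq]
  constructor
  · rintro ⟨i, hi, p, hp, hsw, hx⟩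
    refine ⟨p, hp, hx, ?_⟩
    have hk : p.1.toList ≠ [] := by
      fin_cases hp <;> simp
    exact (exists_pos_iff_isIn q p.1 hk).1 ⟨i, hi, hsw⟩
  · rintro ⟨p, hp, hx, hin⟩
    have hk : p.1.toList ≠ [] := by
      fin_cases hp <;> simp
    obtain ⟨i, hi, hsw⟩ := (exists_pos_iff_isIn q p.1 hk).2 hin
    exact ⟨i, hi, p, hp, hsw, hx⟩

-- ===== VERDICT (by name: the statement is the Claim_ definition above) =====
set_option maxHeartbeats 1000000 in
theorem extract_activities_py_spec : Claim_equal_extract_activities_py := by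
  intro query _
  unfold Spec_extract_activities_py extract_activities_py extract_activities_py_alt
  simp only [contains_found]
  simp only [labelOrder, kwLabels, List.filter_cons, List.filter_nil, List.any_cons,
    List.any_nil, String.reduceBEq, beq_self_eq_true, Bool.false_and, Bool.true_and,
    Bool.or_false, Bool.false_or]
  generalize PySem.Str.isIn "beach" (PySem.Str.lower query) = b1
  generalize PySem.Str.isIn "trek" (PySem.Str.lower query) = b2
  generalize PySem.Str.isIn "adventure" (PySem.Str.lower query) = b3
  generalize (PySem.Str.isIn "cultural" (PySem.Str.lower query) ||
      (PySem.Str.isIn "heritage" (PySem.Str.lower query) ||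
        PySem.Str.isIn "temple" (PySem.Str.lower query))) = b4
  generalize (PySem.Str.isIn "nightlife" (PySem.Str.lower query) ||
      (PySem.Str.isIn "party" (PySem.Str.lower query) ||
        PySem.Str.isIn "club" (PySem.Str.lower query))) = b5
  generalize (PySem.Str.isIn "nature" (PySem.Str.lower query) ||
      PySem.Str.isIn "wildlife" (PySem.Str.lower query)) = b6
  cases b1 <;> cases b2 <;> cases b3 <;> cases b4 <;> cases b5 <;> cases b6 <;> rfl
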